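-- pv_equiv track=rewrite | github.com/ViktoriaOs/ulohy | uloha.py | coho_je_viac
-- ===== SOURCE A (Python) =====
-- def coho_je_viac(z):
--     par=sum(1 for cislo in z if cislo%2==0)
--     npar=sum(1 for cislo in z if cislo%2!=0)
--     if par>npar:
--         return "parne"
--     elif par<npar:
--         return "neparne"
--     else:
--         return "rovnake"
-- ===== SOURCE B (Python) =====
-- def coho_je_viac(z):
--     balance = 0
--     for cislo in z:
--         balance += 1 if cislo % 2 == 0 else -1
--     if balance > 0:
--         return "parne"
--     elif balance < 0:
--         return "neparne"
--     else:
--         return "rovnake"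
-- ===== Notes on version B (the rewrite author's own statement) =====
-- stated objective: simpler
-- what changed: Replaces the two generator passes counting evens and odds separately by a single pass maintaining one signed balance (+1 for even, -1 for odd) whose sign decides the answer.
import Mathlib
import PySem

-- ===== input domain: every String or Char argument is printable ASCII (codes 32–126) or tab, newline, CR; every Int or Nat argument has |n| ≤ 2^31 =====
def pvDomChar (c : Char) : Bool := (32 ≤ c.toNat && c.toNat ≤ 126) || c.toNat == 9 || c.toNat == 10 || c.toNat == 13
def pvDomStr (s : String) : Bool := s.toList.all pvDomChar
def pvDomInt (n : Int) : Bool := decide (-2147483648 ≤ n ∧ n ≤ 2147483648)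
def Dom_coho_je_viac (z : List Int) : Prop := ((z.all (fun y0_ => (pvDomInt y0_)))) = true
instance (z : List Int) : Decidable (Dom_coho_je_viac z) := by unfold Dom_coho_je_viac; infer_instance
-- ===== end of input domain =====

-- B replaces A's two separate counting passes (evens, odds) by one pass over a single
-- signed balance whose sign decides the answer; objective: simpler.

-- ===== PORT A =====
-- sum(1 for cislo in z if cislo%2==0) as a fold accumulating the count
def coho_je_viac (z : List Int) : String :=
  let par := z.foldl (fun acc cislo => if PySem.Int.mod cislo 2 == 0 then acc + 1 else acc) (0 : Int)
  let npar := z.foldl (fun acc cislo => if PySem.Int.mod cislo 2 != 0 then acc + 1 else acc) (0 : Int)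
  if par > npar then "parne"
  else if par < npar then "neparne"
  else "rovnake"

-- ===== PORT B =====
def coho_je_viac_alt (z : List Int) : String :=
  let balance := z.foldl (fun b cislo => b + (if PySem.Int.mod cislo 2 == 0 then (1 : Int) else -1)) 0
  if balance > 0 then "parne"
  else if balance < 0 then "neparne"
  else "rovnake"

-- ===== PRECONDITION & SPEC =====
def Spec_coho_je_viac (z : List Int) (out : String) : Prop := out = coho_je_viac_alt z
instance (z : List Int) (out : String) : Decidable (Spec_coho_je_viac z out) := by unfold Spec_coho_je_viac; infer_instance

-- ===== CLAIM (what is proved, stated in full; the proofs are below) =====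
def Claim_equal_coho_je_viac : Prop := ∀ (z : List Int), Dom_coho_je_viac z → Spec_coho_je_viac z (coho_je_viac z)

-- ===== LEMMAS AND PROOFS =====

-- B's balance fold equals A's even count minus A's odd count, for matching accumulators.
lemma balance_eq_diff (z : List Int) (a b : Int) :
    z.foldl (fun b cislo => b + (if PySem.Int.mod cislo 2 == 0 then (1 : Int) else -1)) (a - b)
      = z.foldl (fun acc cislo => if PySem.Int.mod cislo 2 == 0 then acc + 1 else acc) a
        - z.foldl (fun acc cislo => if PySem.Int.mod cislo 2 != 0 then acc + 1 else acc) b := by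
  induction z generalizing a b with
  | nil => simp
  | cons x xs ih =>
    simp only [List.foldl]
    by_cases h : (PySem.Int.mod x 2 == 0) = true
    · have h2 : (PySem.Int.mod x 2 != 0) = false := by simp [bne]; simpa using h
      rw [if_pos h, if_pos h, if_neg (by rw [h2]; simp)]
      rw [show a - b + 1 = (a + 1) - b by ring]
      exact ih (a + 1) b
    · have h2 : (PySem.Int.mod x 2 != 0) = true := by simp [bne]; simpa using h
      rw [if_neg h, if_neg h, if_pos h2]
      rw [show a - b + -1 = a - (b + 1) by ring]
      exact ih a (b + 1)

-- ===== VERDICT (by name: the statement is the Claim_ definition above) =====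
theorem coho_je_viac_spec : Claim_equal_coho_je_viac := by
  intro z _
  unfold Spec_coho_je_viac coho_je_viac coho_je_viac_alt
  have h := balance_eq_diff z 0 0
  rw [show (0:Int) - 0 = 0 by ring] at h
  simp only []
  rw [h]
  set p := z.foldl (fun acc cislo => if PySem.Int.mod cislo 2 == 0 then acc + 1 else acc) (0:Int)
  set q := z.foldl (fun acc cislo => if PySem.Int.mod cislo 2 != 0 then acc + 1 else acc) (0:Int)
  split_ifs <;> first | rfl | omega
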